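-- pv_equiv track=rewrite | github.com/ChrisBastajian/Finance-Paradise | complete_implementation_demo/app.py | aggregate_candles
-- ===== SOURCE A (Python) =====
-- def aggregate_candles(base_candles, b_vol, s_vol, window):
--     if not base_candles: return [], [], []
--     agg_c, agg_b, agg_s = [], [], []
--     for i in range(0, len(base_candles), window):
--         chunk = base_candles[i: i + window]
--         if not chunk: continue
--         o = chunk[0][0]
--         h = max(c[1] for c in chunk)
--         l = min(c[2] for c in chunk)
--         c = chunk[-1][3]
--         agg_c.append((o, h, l, c))
--         agg_b.append(sum(b_vol[i: i + window]))
--         agg_s.append(sum(s_vol[i: i + window]))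
--     return agg_c, agg_b, agg_s
-- ===== SOURCE B (Python) =====
-- def aggregate_candles(base_candles, b_vol, s_vol, window):
--     if not base_candles or window <= 0:
--         return [], [], []
--
--     def window_sum(vol, start):
--         total = 0
--         stop = min(start + window, len(vol))
--         j = start
--         while j < stop:
--             total += vol[j]
--             j += 1
--         return total
--
--     agg_c, agg_b, agg_s = [], [], []
--     n = len(base_candles)
--     o = h = l = c = 0
--     count = 0
--     start = 0
--     for i in range(n):
--         cd = base_candles[i]
--         if count == 0:
--             start = i
--             o, h, l = cd[0], cd[1], cd[2]
--         else:
--             if cd[1] > h: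
--                 h = cd[1]
--             if cd[2] < l:
--                 l = cd[2]
--         c = cd[3]
--         count += 1
--         if count == window:
--             agg_c.append((o, h, l, c))
--             agg_b.append(window_sum(b_vol, start))
--             agg_s.append(window_sum(s_vol, start))
--             count = 0
--     if count > 0:
--         agg_c.append((o, h, l, c))
--         agg_b.append(window_sum(b_vol, start))
--         agg_s.append(window_sum(s_vol, start))
--     return agg_c, agg_b, agg_s
-- ===== Notes on version B (the rewrite author's own statement) =====
-- stated objective: alternative
-- what changed: A partitions by absolute-index slicing and reduces each chunk with the builtins max/min/sum over fresh slice copies; B streams over the candles once with running open/high/low/close accumulators and a window counter, flushing at each window boundary (and once at the end for a partial window), summing volumes only over the in-range indices of the window.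
import Mathlib
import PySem

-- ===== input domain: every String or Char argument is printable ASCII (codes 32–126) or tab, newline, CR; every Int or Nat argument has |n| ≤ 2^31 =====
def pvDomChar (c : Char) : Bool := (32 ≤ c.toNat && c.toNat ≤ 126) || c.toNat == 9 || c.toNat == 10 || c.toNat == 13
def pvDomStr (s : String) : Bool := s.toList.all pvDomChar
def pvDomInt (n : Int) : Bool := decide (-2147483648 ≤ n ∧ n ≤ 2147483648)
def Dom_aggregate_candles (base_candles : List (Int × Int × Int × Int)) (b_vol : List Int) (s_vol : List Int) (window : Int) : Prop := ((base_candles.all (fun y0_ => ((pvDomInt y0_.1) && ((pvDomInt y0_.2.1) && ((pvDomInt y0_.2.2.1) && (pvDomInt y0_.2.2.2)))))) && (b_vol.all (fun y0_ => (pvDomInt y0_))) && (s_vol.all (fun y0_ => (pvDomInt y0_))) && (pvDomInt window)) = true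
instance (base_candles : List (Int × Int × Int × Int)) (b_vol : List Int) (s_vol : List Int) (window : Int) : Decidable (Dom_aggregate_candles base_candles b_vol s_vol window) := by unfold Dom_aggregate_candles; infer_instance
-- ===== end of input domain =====

-- B replaces A's index-sliced chunks reduced by builtin max/min/sum with a single streaming pass
-- keeping running OHLC accumulators and a window counter, flushing at window boundaries (alternative decomposition, same cost).

-- ===== PORT A =====
-- literal transliteration of A; the foldl state is (agg_c, agg_b, agg_s).
-- chunk[0][0] / max(...) / min(...) / chunk[-1][3] are evaluated under 'chunk ≠ []', where
-- headD / getD 0 / getLastD coincide exactly with Python (no exception can occur there).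
def aggregate_candles (base_candles : List (Int × Int × Int × Int)) (b_vol : List Int) (s_vol : List Int) (window : Int) : (List (Int × Int × Int × Int)) × List Int × List Int :=
  if base_candles = [] then ([], [], []) else
  (PySem.List.pyRange 0 (base_candles.length : Int) window).foldl
    (fun st i =>
      let chunk := PySem.List.slice base_candles (some i) (some (i + window))
      if chunk = [] then st else
      let o := (chunk.headD (0, 0, 0, 0)).1
      let h := (PySem.List.max? (chunk.map (fun c => c.2.1)) (fun y => y)).getD 0
      let l := (PySem.List.min? (chunk.map (fun c => c.2.2.1)) (fun y => y)).getD 0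
      let c := (chunk.getLastD (0, 0, 0, 0)).2.2.2
      (st.1 ++ [(o, h, l, c)],
       st.2.1 ++ [(PySem.List.slice b_vol (some i) (some (i + window))).sum],
       st.2.2 ++ [(PySem.List.slice s_vol (some i) (some (i + window))).sum]))
    ([], [], [])

-- ===== PORT B =====
-- window_sum(vol, start): while j < stop: total += vol[j]  (stop = min(start+window, len(vol)))
def bWindowSum (vol : List Int) (window : Int) (start : Int) : Int :=
  (PySem.List.pyRange start (min (start + window) (vol.length : Int)) 1).foldl
    (fun total j => total + PySem.List.pyGetD vol j 0) 0

-- one iteration of B's main for-loop; state = (agg_c, agg_b, agg_s, (o,h,l,c), count, start)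
def bStep (base_candles : List (Int × Int × Int × Int)) (b_vol : List Int) (s_vol : List Int) (window : Int)
    (st : (List (Int × Int × Int × Int)) × List Int × List Int × (Int × Int × Int × Int) × Int × Int) (i : Int) :
    (List (Int × Int × Int × Int)) × List Int × List Int × (Int × Int × Int × Int) × Int × Int :=
  match st with
  | (aggC, aggB, aggS, (o, h, l, _c), count, start) =>
    let cd := PySem.List.pyGetD base_candles i (0, 0, 0, 0)
    let (o', h', l', start') :=
      if count = 0 then (cd.1, cd.2.1, cd.2.2.1, i)
      else (o, (if cd.2.1 > h then cd.2.1 else h), (if cd.2.2.1 < l then cd.2.2.1 else l), start)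
    let c' := cd.2.2.2
    let count' := count + 1
    if count' = window then
      (aggC ++ [(o', h', l', c')], aggB ++ [bWindowSum b_vol window start'],
       aggS ++ [bWindowSum s_vol window start'], (o', h', l', c'), 0, start')
    else (aggC, aggB, aggS, (o', h', l', c'), count', start')

def aggregate_candles_alt (base_candles : List (Int × Int × Int × Int)) (b_vol : List Int) (s_vol : List Int) (window : Int) : (List (Int × Int × Int × Int)) × List Int × List Int :=
  if base_candles = [] ∨ window ≤ 0 then ([], [], []) else
  match (PySem.List.pyRange 0 (base_candles.length : Int) 1).foldl
      (bStep base_candles b_vol s_vol window) ([], [], [], (0, 0, 0, 0), 0, 0) with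
  | (aggC, aggB, aggS, ohlc, count, start) =>
    if 0 < count then
      (aggC ++ [ohlc], aggB ++ [bWindowSum b_vol window start], aggS ++ [bWindowSum s_vol window start])
    else (aggC, aggB, aggS)

-- ===== PRECONDITION & SPEC =====
-- Pre_ excludes only the inputs where A raises: window = 0 with a nonempty candle list
-- (range(0, n, 0) is a ValueError in Python).
def Pre_aggregate_candles (base_candles : List (Int × Int × Int × Int)) (b_vol : List Int) (s_vol : List Int) (window : Int) : Prop :=
  base_candles = [] ∨ window ≠ 0
instance (base_candles : List (Int × Int × Int × Int)) (b_vol : List Int) (s_vol : List Int) (window : Int) : Decidable (Pre_aggregate_candles base_candles b_vol s_vol window) := by unfold Pre_aggregate_candles; infer_instance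

def pvWitness_aggregate_candles : (List (Int × Int × Int × Int)) × List Int × List Int × Int :=
  ([(1, 3, 0, 2), (2, 5, 1, 4), (4, 4, 2, 3)], [10, 20, 30], [1, 2], 2)

def Spec_aggregate_candles (base_candles : List (Int × Int × Int × Int)) (b_vol : List Int) (s_vol : List Int) (window : Int) (out : (List (Int × Int × Int × Int)) × List Int × List Int) : Prop := out = aggregate_candles_alt base_candles b_vol s_vol window
instance (base_candles : List (Int × Int × Int × Int)) (b_vol : List Int) (s_vol : List Int) (window : Int) (out : (List (Int × Int × Int × Int)) × List Int × List Int) : Decidable (Spec_aggregate_candles base_candles b_vol s_vol window out) := by unfold Spec_aggregate_candles; infer_instance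

-- ===== CLAIM (what is proved, stated in full; the proofs are below) =====
def Claim_equal_aggregate_candles : Prop := ∀ (base_candles : List (Int × Int × Int × Int)) (b_vol : List Int) (s_vol : List Int) (window : Int), Dom_aggregate_candles base_candles b_vol s_vol window → Pre_aggregate_candles base_candles b_vol s_vol window → Spec_aggregate_candles base_candles b_vol s_vol window (aggregate_candles base_candles b_vol s_vol window)

-- ===== LEMMAS AND PROOFS =====

-- proof-side name for A's loop body (identical to the lambda inside aggregate_candles)
def aBody (base_candles : List (Int × Int × Int × Int)) (b_vol : List Int) (s_vol : List Int) (window : Int)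
    (st : (List (Int × Int × Int × Int)) × List Int × List Int) (i : Int) :
    (List (Int × Int × Int × Int)) × List Int × List Int :=
  let chunk := PySem.List.slice base_candles (some i) (some (i + window))
  if chunk = [] then st else
  let o := (chunk.headD (0, 0, 0, 0)).1
  let h := (PySem.List.max? (chunk.map (fun c => c.2.1)) (fun y => y)).getD 0
  let l := (PySem.List.min? (chunk.map (fun c => c.2.2.1)) (fun y => y)).getD 0
  let c := (chunk.getLastD (0, 0, 0, 0)).2.2.2
  (st.1 ++ [(o, h, l, c)],
   st.2.1 ++ [(PySem.List.slice b_vol (some i) (some (i + window))).sum],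
   st.2.2 ++ [(PySem.List.slice s_vol (some i) (some (i + window))).sum])

-- proof-side name for B's final partial-window flush
def bFlush (b_vol : List Int) (s_vol : List Int) (window : Int)
    (st : (List (Int × Int × Int × Int)) × List Int × List Int × (Int × Int × Int × Int) × Int × Int) :
    (List (Int × Int × Int × Int)) × List Int × List Int :=
  match st with
  | (aggC, aggB, aggS, ohlc, count, start) =>
    if 0 < count then
      (aggC ++ [ohlc], aggB ++ [bWindowSum b_vol window start], aggS ++ [bWindowSum s_vol window start])
    else (aggC, aggB, aggS)

-- B's running scans over a candle segment, named so the loop lemmas can rewrite them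
def segOf (base_candles : List (Int × Int × Int × Int)) (a b : Int) : List (Int × Int × Int × Int) :=
  (PySem.List.pyRange a b 1).map (fun j => PySem.List.pyGetD base_candles j (0, 0, 0, 0))

def scanH (seg : List (Int × Int × Int × Int)) (h : Int) : Int :=
  seg.foldl (fun h x => if x.2.1 > h then x.2.1 else h) h

def scanL (seg : List (Int × Int × Int × Int)) (l : Int) : Int :=
  seg.foldl (fun l x => if x.2.2.1 < l then x.2.2.1 else l) l

def scanC (seg : List (Int × Int × Int × Int)) (c : Int) : Int :=
  seg.foldl (fun _ x => x.2.2.2) c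

lemma scanH_nil (h : Int) : scanH [] h = h := rfl
lemma scanL_nil (l : Int) : scanL [] l = l := rfl
lemma scanC_nil (c : Int) : scanC [] c = c := rfl
lemma scanH_cons (x : Int × Int × Int × Int) (t : List (Int × Int × Int × Int)) (h : Int) :
    scanH (x :: t) h = scanH t (if x.2.1 > h then x.2.1 else h) := rfl
lemma scanL_cons (x : Int × Int × Int × Int) (t : List (Int × Int × Int × Int)) (l : Int) :
    scanL (x :: t) l = scanL t (if x.2.2.1 < l then x.2.2.1 else l) := rfl
lemma scanC_cons (x : Int × Int × Int × Int) (t : List (Int × Int × Int × Int)) (c : Int) :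
    scanC (x :: t) c = scanC t x.2.2.2 := rfl

lemma segOf_nil (base_candles : List (Int × Int × Int × Int)) {a b : Int} (hba : b ≤ a) :
    segOf base_candles a b = [] := by
  unfold segOf
  rw [PySem.List.pyRange_one_eq_nil hba, List.map_nil]

lemma segOf_cons (base_candles : List (Int × Int × Int × Int)) {a b : Int} (hab : a < b) :
    segOf base_candles a b
      = PySem.List.pyGetD base_candles a (0, 0, 0, 0) :: segOf base_candles (a + 1) b := by
  unfold segOf
  rw [PySem.List.pyRange_one_cons hab, List.map_cons]

lemma aggregate_candles_eq_fold (base_candles : List (Int × Int × Int × Int)) (b_vol s_vol : List Int)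
    (window : Int) (hb : base_candles ≠ []) :
    aggregate_candles base_candles b_vol s_vol window
      = (PySem.List.pyRange 0 (base_candles.length : Int) window).foldl
          (aBody base_candles b_vol s_vol window) ([], [], []) := by
  unfold aggregate_candles aBody
  rw [if_neg hb]

lemma alt_eq_flush (base_candles : List (Int × Int × Int × Int)) (b_vol s_vol : List Int)
    (window : Int) (hb : base_candles ≠ []) (hw : 0 < window) :
    aggregate_candles_alt base_candles b_vol s_vol window
      = bFlush b_vol s_vol window
          ((PySem.List.pyRange 0 (base_candles.length : Int) 1).foldl
            (bStep base_candles b_vol s_vol window) ([], [], [], (0, 0, 0, 0), 0, 0)) := by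
  unfold aggregate_candles_alt bFlush
  rw [if_neg (by rintro (h | h); exact hb h; omega)]

-- range with a positive step, unfolded one element / empty
lemma pyRange_cons_of_pos {a b s : Int} (hs : 0 < s) (hab : a < b) :
    PySem.List.pyRange a b s = a :: PySem.List.pyRange (a + s) b s := by
  rw [PySem.List.pyRange_of_pos a b hs, PySem.List.pyRange_of_pos (a + s) b hs]
  have e1 : b - a + s - 1 = (b - a - 1) + 1 * s := by ring
  have h1 : (b - a + s - 1) / s = (b - a - 1) / s + 1 := by
    rw [e1, Int.add_mul_ediv_right _ _ hs.ne']
  have hq : 0 ≤ (b - a - 1) / s := Int.ediv_nonneg (by omega) hs.le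
  rw [if_pos hab, h1]
  by_cases h2 : a + s < b
  · have e2 : b - (a + s) + s - 1 = b - a - 1 := by ring
    rw [if_pos h2, e2]
    have ht : ((b - a - 1) / s + 1).toNat = ((b - a - 1) / s).toNat + 1 := by omega
    rw [ht, List.range_succ_eq_map]
    simp only [List.map_cons, List.map_map]
    congr 1
    · simp
    · apply List.map_congr_left
      intro k _
      simp [Function.comp, Nat.succ_eq_add_one]
      ring
  · have hz : (b - a - 1) / s = 0 :=
      Int.ediv_eq_zero_of_lt (by omega) (by omega)
    rw [if_neg h2, hz]
    simp

lemma pyRange_nil_of_pos {a b s : Int} (hs : 0 < s) (hba : b ≤ a) :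
    PySem.List.pyRange a b s = [] := by
  simp [PySem.List.pyRange, hs.ne', not_lt.mpr hba, hs]

lemma pyRange_nil_of_neg {a b s : Int} (hs : s < 0) (hab : a ≤ b) :
    PySem.List.pyRange a b s = [] := by
  simp [PySem.List.pyRange, hs.ne, not_lt.mpr hab, not_lt.mpr hs.le]

-- a bounded index comprehension is a drop/take segment
lemma segMap {α : Type} (xs : List α) (d : α) :
    ∀ (k : Nat) (a b : Int), 0 ≤ a → b = a + (k : Int) → b ≤ (xs.length : Int) →
    (PySem.List.pyRange a b 1).map (fun j => PySem.List.pyGetD xs j d)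
      = (xs.drop a.toNat).take k := by
  intro k
  induction k with
  | zero =>
    intro a b h0 hb _
    rw [PySem.List.pyRange_one_eq_nil (by omega)]
    simp
  | succ k ih =>
    intro a b h0 hb hlen
    have ha : a < b := by omega
    have hal : a.toNat < xs.length := by omega
    rw [PySem.List.pyRange_one_cons ha, List.map_cons,
        ih (a + 1) b (by omega) (by omega) hlen,
        List.drop_eq_getElem_cons hal]
    have h1 : (a + 1).toNat = a.toNat + 1 := by omega
    rw [h1, List.take_succ_cons]
    congr 1
    rw [PySem.List.pyGetD_of_nonneg xs d h0, List.getD_eq_getElem xs d hal]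

-- the chunk base[a:a+w] is its first element consed on the in-range tail segment
lemma chunkDecomp (base_candles : List (Int × Int × Int × Int)) {w a : Int} (hw : 0 < w)
    (h0 : 0 ≤ a) (ha : a < (base_candles.length : Int)) :
    PySem.List.slice base_candles (some a) (some (a + w))
      = PySem.List.pyGetD base_candles a (0, 0, 0, 0)
        :: segOf base_candles (a + 1) (min (a + w) (base_candles.length : Int)) := by
  have hal : a.toNat < base_candles.length := by omega
  unfold segOf
  rw [PySem.List.slice_toNat base_candles h0 (by omega),
      segMap base_candles (0, 0, 0, 0) ((min (a + w) (base_candles.length : Int)) - (a + 1)).toNat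
        (a + 1) _ (by omega) (by omega) (by omega),
      List.drop_eq_getElem_cons hal]
  have h1 : (a + 1).toNat = a.toNat + 1 := by omega
  have h2 : (a + w).toNat - a.toNat = (w.toNat - 1) + 1 := by omega
  rw [h1, h2, List.take_succ_cons]
  congr 1
  · rw [PySem.List.pyGetD_of_nonneg _ _ h0, List.getD_eq_getElem _ _ hal]
  · rw [List.take_eq_take_iff]
    simp only [List.length_drop, min_def]
    split_ifs <;> omega

-- Python's sum over the slice vol[a:a+w] is B's bounded index loop
lemma sliceSum (vol : List Int) {w a : Int} (hw : 0 < w) (h0 : 0 ≤ a) :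
    (PySem.List.slice vol (some a) (some (a + w))).sum = bWindowSum vol w a := by
  unfold bWindowSum
  rw [PySem.List.foldl_add, zero_add,
      PySem.List.slice_toNat vol h0 (by omega)]
  by_cases hl : a ≤ (vol.length : Int)
  · rw [segMap vol 0 ((min (a + w) (vol.length : Int)) - a).toNat a _ h0 (by omega) (by omega)]
    congr 1
    rw [List.take_eq_take_iff]
    simp only [List.length_drop, min_def]
    split_ifs <;> omega
  · rw [PySem.List.pyRange_one_eq_nil (by omega), List.map_nil,
        List.drop_eq_nil_of_le (by omega)]
    simp

lemma if_gt_eq_max (h x : Int) : (if x > h then x else h) = max h x := by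
  rcases lt_or_ge h x with hh | hh
  · rw [if_pos hh, max_eq_right hh.le]
  · rw [if_neg (not_lt.mpr hh), max_eq_left hh]

lemma if_lt_eq_min (l x : Int) : (if x < l then x else l) = min l x := by
  rcases lt_or_ge x l with hh | hh
  · rw [if_pos hh, min_eq_right hh.le]
  · rw [if_neg (not_lt.mpr hh), min_eq_left hh]

lemma foldl_keep_last {α β : Type} (f : α → β) :
    ∀ (l : List α) (b : β), l.foldl (fun _ y => f y) b = (l.map f).getLastD b := by
  intro l
  induction l with
  | nil => intro b; rfl
  | cons x t ih => intro b; simp only [List.foldl_cons, List.map_cons, List.getLastD_cons, ih]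

lemma getLastD_map {α β : Type} (f : α → β) :
    ∀ (l : List α) (x : α), (l.map f).getLastD (f x) = f (l.getLastD x) := by
  intro l
  induction l with
  | nil => intro x; rfl
  | cons y t ih => intro x; simp only [List.map_cons, List.getLastD_cons, ih]

-- A's four chunk reductions are B's running-accumulator scans over the tail segment
lemma chunkVals (base_candles : List (Int × Int × Int × Int)) {w a : Int} (hw : 0 < w)
    (h0 : 0 ≤ a) (ha : a < (base_candles.length : Int)) :
    (((PySem.List.slice base_candles (some a) (some (a + w))).headD (0, 0, 0, 0)).1
       = (PySem.List.pyGetD base_candles a (0, 0, 0, 0)).1)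
    ∧ ((PySem.List.max? ((PySem.List.slice base_candles (some a) (some (a + w))).map (fun c => c.2.1)) (fun y => y)).getD 0
       = scanH (segOf base_candles (a + 1) (min (a + w) (base_candles.length : Int)))
           (PySem.List.pyGetD base_candles a (0, 0, 0, 0)).2.1)
    ∧ ((PySem.List.min? ((PySem.List.slice base_candles (some a) (some (a + w))).map (fun c => c.2.2.1)) (fun y => y)).getD 0
       = scanL (segOf base_candles (a + 1) (min (a + w) (base_candles.length : Int)))
           (PySem.List.pyGetD base_candles a (0, 0, 0, 0)).2.2.1)
    ∧ (((PySem.List.slice base_candles (some a) (some (a + w))).getLastD (0, 0, 0, 0)).2.2.2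
       = scanC (segOf base_candles (a + 1) (min (a + w) (base_candles.length : Int)))
           (PySem.List.pyGetD base_candles a (0, 0, 0, 0)).2.2.2) := by
  rw [chunkDecomp base_candles hw h0 ha]
  set cd := PySem.List.pyGetD base_candles a (0, 0, 0, 0) with hcd
  set seg := segOf base_candles (a + 1) (min (a + w) (base_candles.length : Int)) with hseg
  have hmax : (fun (h : Int) (x : Int × Int × Int × Int) => if x.2.1 > h then x.2.1 else h)
      = fun h x => max h x.2.1 := by
    funext h x; exact if_gt_eq_max h x.2.1
  have hmin : (fun (l : Int) (x : Int × Int × Int × Int) => if x.2.2.1 < l then x.2.2.1 else l)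
      = fun l x => min l x.2.2.1 := by
    funext l x; exact if_lt_eq_min l x.2.2.1
  refine ⟨rfl, ?_, ?_, ?_⟩
  · unfold scanH
    simp only [List.map_cons, PySem.List.max?_id_cons, Option.getD_some, hmax, List.foldl_map]
  · unfold scanL
    simp only [List.map_cons, PySem.List.min?_id_cons, Option.getD_some, hmin, List.foldl_map]
  · unfold scanC
    simp only [List.getLastD_cons, foldl_keep_last,
      getLastD_map (fun x : Int × Int × Int × Int => x.2.2.2) seg cd]

-- B's loop strictly inside a window (count = k with 1 ≤ k < window) is a pure scan,
-- completing the window exactly when k + (b - a) = window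
lemma innerScan (base_candles : List (Int × Int × Int × Int)) (b_vol s_vol : List Int) (window : Int) :
    ∀ (fuel : Nat) (a b k : Int), (b - a).toNat ≤ fuel → 1 ≤ k → k < window → k + (b - a) ≤ window → a ≤ b →
    ∀ (L1 : List (Int × Int × Int × Int)) (L2 L3 : List Int) (o h l c s : Int),
    (PySem.List.pyRange a b 1).foldl (bStep base_candles b_vol s_vol window) (L1, L2, L3, (o, h, l, c), k, s)
    = (if k + (b - a) = window then
         (L1 ++ [(o, scanH (segOf base_candles a b) h, scanL (segOf base_candles a b) l, scanC (segOf base_candles a b) c)],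
          L2 ++ [bWindowSum b_vol window s], L3 ++ [bWindowSum s_vol window s],
          (o, scanH (segOf base_candles a b) h, scanL (segOf base_candles a b) l, scanC (segOf base_candles a b) c), 0, s)
       else (L1, L2, L3,
          (o, scanH (segOf base_candles a b) h, scanL (segOf base_candles a b) l, scanC (segOf base_candles a b) c),
          k + (b - a), s)) := by
  intro fuel
  induction fuel with
  | zero =>
    intro a b k hf h1 h2 h3 h4 L1 L2 L3 o h l c s
    have hab : b = a := by omega
    subst hab
    rw [PySem.List.pyRange_one_eq_nil le_rfl, segOf_nil base_candles le_rfl]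
    simp only [List.foldl_nil, scanH_nil, scanL_nil, scanC_nil]
    rw [if_neg (by omega)]
    simp
  | succ fuel ih =>
    intro a b k hf h1 h2 h3 h4 L1 L2 L3 o h l c s
    rcases eq_or_lt_of_le h4 with hab | hab
    · subst hab
      rw [PySem.List.pyRange_one_eq_nil le_rfl, segOf_nil base_candles le_rfl]
      simp only [List.foldl_nil, scanH_nil, scanL_nil, scanC_nil]
      rw [if_neg (by omega)]
      simp
    · rw [PySem.List.pyRange_one_cons hab, segOf_cons base_candles hab]
      simp only [List.foldl_cons, scanH_cons, scanL_cons, scanC_cons]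
      set cd := PySem.List.pyGetD base_candles a (0, 0, 0, 0) with hcd
      have hstep : bStep base_candles b_vol s_vol window (L1, L2, L3, (o, h, l, c), k, s) a
          = if k + 1 = window then
              (L1 ++ [(o, (if cd.2.1 > h then cd.2.1 else h), (if cd.2.2.1 < l then cd.2.2.1 else l), cd.2.2.2)],
               L2 ++ [bWindowSum b_vol window s], L3 ++ [bWindowSum s_vol window s],
               (o, (if cd.2.1 > h then cd.2.1 else h), (if cd.2.2.1 < l then cd.2.2.1 else l), cd.2.2.2), 0, s)
            else (L1, L2, L3,
               (o, (if cd.2.1 > h then cd.2.1 else h), (if cd.2.2.1 < l then cd.2.2.1 else l), cd.2.2.2), k + 1, s) := by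
        simp only [bStep, ← hcd, if_neg (by omega : ¬ k = 0)]
      rw [hstep]
      by_cases hkw : k + 1 = window
      · have hb1 : b = a + 1 := by omega
        subst hb1
        rw [if_pos hkw]
        rw [PySem.List.pyRange_one_eq_nil le_rfl, segOf_nil base_candles le_rfl]
        simp only [List.foldl_nil, scanH_nil, scanL_nil, scanC_nil]
        rw [if_pos (show k + (a + 1 - a) = window from by omega)]
      · rw [if_neg hkw,
            ih (a + 1) b (k + 1) (by omega) (by omega) (by omega) (by omega) (by omega)]
        by_cases hc : k + (b - a) = window
        · rw [if_pos (by omega), if_pos hc]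
        · rw [if_neg (by omega), if_neg hc]
          have he : k + 1 + (b - (a + 1)) = k + (b - a) := by ring
          rw [he]

-- the two loops agree window by window from any window-boundary state onward
lemma mainLoop (base_candles : List (Int × Int × Int × Int)) (b_vol s_vol : List Int) (window : Int)
    (hw : 0 < window) :
    ∀ (fuel : Nat) (a : Int), ((base_candles.length : Int) - a).toNat ≤ fuel → 0 ≤ a → a ≤ (base_candles.length : Int) →
    ∀ (L1 : List (Int × Int × Int × Int)) (L2 L3 : List Int) (X : Int × Int × Int × Int) (s : Int),
    (PySem.List.pyRange a (base_candles.length : Int) window).foldl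
        (aBody base_candles b_vol s_vol window) (L1, L2, L3)
    = bFlush b_vol s_vol window
        ((PySem.List.pyRange a (base_candles.length : Int) 1).foldl
          (bStep base_candles b_vol s_vol window) (L1, L2, L3, X, 0, s)) := by
  intro fuel
  induction fuel with
  | zero =>
    intro a hf h0 ha L1 L2 L3 X s
    have hae : a = (base_candles.length : Int) := by omega
    subst hae
    rw [pyRange_nil_of_pos hw le_rfl, PySem.List.pyRange_one_eq_nil le_rfl]
    simp [bFlush]
  | succ fuel ih =>
    intro a hf h0 ha L1 L2 L3 X s
    rcases eq_or_lt_of_le ha with hae | hlt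
    · subst hae
      rw [pyRange_nil_of_pos hw le_rfl, PySem.List.pyRange_one_eq_nil le_rfl]
      simp [bFlush]
    · rw [pyRange_cons_of_pos hw hlt, PySem.List.pyRange_one_cons hlt]
      simp only [List.foldl_cons]
      set n : Int := (base_candles.length : Int) with hn
      set m : Int := min (a + window) n with hm
      set cd := PySem.List.pyGetD base_candles a (0, 0, 0, 0) with hcd
      set seg := segOf base_candles (a + 1) m with hseg
      obtain ⟨e1, e2, e3, e4⟩ := chunkVals base_candles hw h0 hlt
      have habody : aBody base_candles b_vol s_vol window (L1, L2, L3) a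
          = (L1 ++ [(cd.1, scanH seg cd.2.1, scanL seg cd.2.2.1, scanC seg cd.2.2.2)],
             L2 ++ [bWindowSum b_vol window a], L3 ++ [bWindowSum s_vol window a]) := by
        unfold aBody
        rw [if_neg (by rw [chunkDecomp base_candles hw h0 hlt]; exact List.cons_ne_nil _ _)]
        rw [e1, e2, e3, e4, sliceSum b_vol hw h0, sliceSum s_vol hw h0]
      have hbstep : bStep base_candles b_vol s_vol window (L1, L2, L3, X, 0, s) a
          = if (1 : Int) = window then
              (L1 ++ [(cd.1, cd.2.1, cd.2.2.1, cd.2.2.2)], L2 ++ [bWindowSum b_vol window a],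
               L3 ++ [bWindowSum s_vol window a], (cd.1, cd.2.1, cd.2.2.1, cd.2.2.2), 0, a)
            else (L1, L2, L3, (cd.1, cd.2.1, cd.2.2.1, cd.2.2.2), 1, a) := by
        rcases X with ⟨o, h, l, c⟩
        simp only [bStep, ← hcd]
        norm_num
      rw [habody, hbstep]
      by_cases hw1 : (1 : Int) = window
      · -- window = 1: the first element already completes its window
        have hm1 : m = a + 1 := by omega
        have hsegnil : seg = [] := by rw [hseg, hm1]; exact segOf_nil base_candles le_rfl
        rw [if_pos hw1, hsegnil, scanH_nil, scanL_nil, scanC_nil]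
        have hstep1 : a + window = a + 1 := by omega
        rw [hstep1]
        exact ih (a + 1) (by omega) (by omega) (by omega) _ _ _ _ a
      · rw [if_neg hw1]
        have ham : a + 1 ≤ m := by omega
        have hmn : m ≤ n := by omega
        rw [PySem.List.pyRange_one_append (a + 1) m n ham hmn, List.foldl_append]
        rw [innerScan base_candles b_vol s_vol window (m - (a + 1)).toNat (a + 1) m 1
              le_rfl le_rfl (by omega) (by omega) ham]
        by_cases hcomp : a + window ≤ n
        · have hma : m = a + window := by omega
          rw [if_pos (show (1 : Int) + (m - (a + 1)) = window from by omega)]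
          rw [← hseg]
          have := ih m (by omega) (by omega) (by omega)
            (L1 ++ [(cd.1, scanH seg cd.2.1, scanL seg cd.2.2.1, scanC seg cd.2.2.2)])
            (L2 ++ [bWindowSum b_vol window a]) (L3 ++ [bWindowSum s_vol window a])
            (cd.1, scanH seg cd.2.1, scanL seg cd.2.2.1, scanC seg cd.2.2.2) a
          rw [← hma]
          exact this
        · have hma : m = n := by omega
          rw [if_neg (by omega), ← hseg]
          rw [hma, PySem.List.pyRange_one_eq_nil le_rfl,
              pyRange_nil_of_pos hw (by omega : n ≤ a + window)]
          simp only [List.foldl_nil]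
          unfold bFlush
          have hcnt : (0 : Int) < 1 + (n - (a + 1)) := by omega
          simp [hcnt]

-- ===== VERDICT (by name: the statement is the Claim_ definition above) =====
theorem aggregate_candles_spec : Claim_equal_aggregate_candles := by
  intro base_candles b_vol s_vol window _hdom hpre
  unfold Spec_aggregate_candles
  by_cases hb : base_candles = []
  · subst hb; rcases window with _ | _ <;> rfl
  · have hw0 : window ≠ 0 := hpre.resolve_left hb
    rcases lt_or_gt_of_ne hw0 with hneg | hpos
    · -- negative window: A's range is empty, B's guard returns the empty triple
      unfold aggregate_candles aggregate_candles_alt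
      rw [if_neg hb, if_pos (Or.inr hneg.le),
          pyRange_nil_of_neg hneg (by positivity)]
      rfl
    · rw [aggregate_candles_eq_fold _ _ _ _ hb, alt_eq_flush _ _ _ _ hb hpos]
      exact mainLoop base_candles b_vol s_vol window hpos
        ((base_candles.length : Int) - 0).toNat 0 le_rfl le_rfl (by positivity)
        [] [] [] (0, 0, 0, 0) 0
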